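-- pv_equiv track=rewrite | github.com/BSP2113/Signal-Reader | tests/test_pm_orb_morning_context.py | morning_context
-- ===== SOURCE A (Python) =====
-- def morning_context(day):
--     """
--     For each ticker, determine its morning ORB/GAP_GO exit type.
--     Returns two sets: stop_loss_tickers, take_profit_tickers.
--     If a ticker had both (via re-entry), STOP_LOSS takes precedence.
--     Only counts exits before PM window opens (12:44).
--     """
--     stop_tickers = set()
--     take_tickers = set()
--     for t in day["trades"]:
--         if t.get("signal") not in ("ORB", "GAP_GO"):
--             continue
--         if t.get("exit_time", "") > "12:44":
--             continue
--         reason = t.get("exit_reason", "")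
--         ticker = t["ticker"]
--         if reason == "STOP_LOSS":
--             stop_tickers.add(ticker)
--             take_tickers.discard(ticker)   # stop overrides take
--         elif reason == "TAKE_PROFIT" and ticker not in stop_tickers:
--             take_tickers.add(ticker)
--     return stop_tickers, take_tickers
-- ===== SOURCE B (Python) =====
-- def morning_context(day):
--     """
--     For each ticker, determine its morning ORB/GAP_GO exit type.
--     Returns two sets: stop_loss_tickers, take_profit_tickers.
--     If a ticker had both (via re-entry), STOP_LOSS takes precedence.
--     Only counts exits before PM window opens (12:44).
--     """
--     qualifying = [
--         (t["ticker"], t.get("exit_reason", ""))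
--         for t in day["trades"]
--         if t.get("signal") in ("ORB", "GAP_GO") and t.get("exit_time", "") <= "12:44"
--     ]
--     stop_tickers = {tk for tk, reason in qualifying if reason == "STOP_LOSS"}
--     take_tickers = {tk for tk, reason in qualifying
--                     if reason == "TAKE_PROFIT" and tk not in stop_tickers}
--     return stop_tickers, take_tickers
-- ===== Notes on version B (the rewrite author's own statement) =====
-- stated objective: simpler
-- what changed: Instead of one stateful pass that juggles add/discard precedence between the two sets, B materializes the qualifying (ticker, exit_reason) pairs once and then derives the stop set and the take set by two independent comprehensions, filtering takes against the already-complete stop set.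
import Mathlib
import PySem

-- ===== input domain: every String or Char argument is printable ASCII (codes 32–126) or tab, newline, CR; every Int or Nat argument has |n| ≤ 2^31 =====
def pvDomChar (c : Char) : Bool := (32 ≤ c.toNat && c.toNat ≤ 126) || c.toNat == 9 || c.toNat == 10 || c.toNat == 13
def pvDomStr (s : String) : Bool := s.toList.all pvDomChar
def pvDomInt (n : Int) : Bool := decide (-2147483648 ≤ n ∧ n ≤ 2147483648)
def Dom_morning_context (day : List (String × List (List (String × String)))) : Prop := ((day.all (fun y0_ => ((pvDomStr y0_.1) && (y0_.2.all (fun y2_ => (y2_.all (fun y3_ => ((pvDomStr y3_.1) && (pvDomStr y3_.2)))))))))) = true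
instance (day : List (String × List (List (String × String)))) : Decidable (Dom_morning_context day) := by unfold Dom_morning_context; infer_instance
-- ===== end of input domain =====

-- B replaces A's single stateful pass (with its add/discard precedence juggling) by: collect the
-- qualifying (ticker, exit_reason) pairs once, then build the stop set and the take set independently,
-- takes filtered against the completed stop set. Objective: simpler. Same return value wherever A returns.

-- ===== PORT A =====
-- A's for-loop over day["trades"], carrying the two sets; 'none' marks the KeyError on t["ticker"]
-- (excluded by Pre_); the branch order and the two 'continue' tests follow A line by line.
def mcLoopA : List (PySem.Dict String String) → PySem.Set String → PySem.Set String →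
    Option (PySem.Set String × PySem.Set String)
  | [], stop, take => some (stop, take)
  | t :: ts, stop, take =>
    if ((t.get? "signal" == some "ORB") || (t.get? "signal" == some "GAP_GO")) = false then
      mcLoopA ts stop take
    else if PySem.Chars.strLt "12:44".toList (t.getD "exit_time" "").toList then
      mcLoopA ts stop take
    else
      let reason := t.getD "exit_reason" ""
      match t.get? "ticker" with
      | none => none                                  -- KeyError in Python
      | some ticker =>
        if reason == "STOP_LOSS" then
          mcLoopA ts (PySem.Set.add stop ticker) (PySem.Set.discard take ticker)
        else if reason == "TAKE_PROFIT" && !(PySem.Set.contains stop ticker) then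
          mcLoopA ts stop (PySem.Set.add take ticker)
        else
          mcLoopA ts stop take

def morning_context (day : List (String × List (List (String × String)))) : List String × List String :=
  match PySem.Dict.get? (PySem.Dict.mk day) "trades" with
  | none => ([], [])                                  -- KeyError in Python (excluded by Pre_)
  | some trades =>
    (mcLoopA (trades.map PySem.Dict.mk) PySem.Set.empty PySem.Set.empty).getD ([], [])

-- ===== PORT B =====
-- B's list comprehension: the qualifying (ticker, exit_reason) pairs, 'none' = KeyError on t["ticker"].
def mcPairs : List (List (String × String)) → Option (List (String × String))
  | [] => some []
  | t :: ts =>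
    let d := PySem.Dict.mk t
    if ((d.get? "signal" == some "ORB") || (d.get? "signal" == some "GAP_GO"))
        && !(PySem.Chars.strLt "12:44".toList (d.getD "exit_time" "").toList) then
      match d.get? "ticker" with
      | none => none                                  -- KeyError in Python
      | some tk => (mcPairs ts).map (fun rest => (tk, d.getD "exit_reason" "") :: rest)
    else mcPairs ts

def morning_context_alt (day : List (String × List (List (String × String)))) : List String × List String :=
  match PySem.Dict.get? (PySem.Dict.mk day) "trades" with
  | none => ([], [])                                  -- KeyError in Python (excluded by Pre_)
  | some trades =>
    match mcPairs trades with
    | none => ([], [])                                -- KeyError in Python (excluded by Pre_)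
    | some pairs =>
      let stop : PySem.Set String :=
        PySem.Set.ofList ((pairs.filter (fun p => p.2 == "STOP_LOSS")).map Prod.fst)
      let take : PySem.Set String :=
        PySem.Set.ofList ((pairs.filter
          (fun p => p.2 == "TAKE_PROFIT" && !(PySem.Set.contains stop p.1))).map Prod.fst)
      (stop, take)

-- ===== PRECONDITION & SPEC =====
-- the qualifying test of the Python sources, for Pre_ only
def pvQualTrade (t : PySem.Dict String String) : Bool :=
  ((t.get? "signal" == some "ORB") || (t.get? "signal" == some "GAP_GO"))
    && !(PySem.Chars.strLt "12:44".toList (t.getD "exit_time" "").toList)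

-- Pre_ excludes exactly the inputs where the Python A raises KeyError: a day without a "trades" key,
-- or a qualifying trade without a "ticker" key. A returns on everything else.
def Pre_morning_context (day : List (String × List (List (String × String)))) : Prop :=
  (PySem.Dict.get? (PySem.Dict.mk day) "trades").isSome = true ∧
  ∀ t ∈ (PySem.Dict.get? (PySem.Dict.mk day) "trades").getD [],
    pvQualTrade (PySem.Dict.mk t) = true → (PySem.Dict.mk t).contains "ticker" = true
instance (day : List (String × List (List (String × String)))) : Decidable (Pre_morning_context day) := by unfold Pre_morning_context; infer_instance

def pvWitness_morning_context : (List (String × List (List (String × String)))) :=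
  [("trades",
    [[("signal", "ORB"), ("exit_time", "09:31"), ("exit_reason", "STOP_LOSS"), ("ticker", "AAPL")],
     [("signal", "GAP_GO"), ("exit_time", "10:05"), ("exit_reason", "TAKE_PROFIT"), ("ticker", "TSLA")]])]

def Spec_morning_context (day : List (String × List (List (String × String)))) (out : List String × List String) : Prop := out = morning_context_alt day
instance (day : List (String × List (List (String × String)))) (out : List String × List String) : Decidable (Spec_morning_context day out) := by unfold Spec_morning_context; infer_instance

-- ===== CLAIM (what is proved, stated in full; the proofs are below) =====
def Claim_equal_morning_context : Prop := ∀ (day : List (String × List (List (String × String)))), Dom_morning_context day → Pre_morning_context day → Spec_morning_context day (morning_context day)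

-- ===== LEMMAS AND PROOFS =====

-- A's loop restated over the extracted (ticker, reason) pairs
def mcLoopP : List (String × String) → PySem.Set String → PySem.Set String →
    PySem.Set String × PySem.Set String
  | [], stop, take => (stop, take)
  | (tk, r) :: ps, stop, take =>
    if r == "STOP_LOSS" then
      mcLoopP ps (PySem.Set.add stop tk) (PySem.Set.discard take tk)
    else if r == "TAKE_PROFIT" && !(PySem.Set.contains stop tk) then
      mcLoopP ps stop (PySem.Set.add take tk)
    else
      mcLoopP ps stop take

def mcStops (ps : List (String × String)) : List String :=
  (ps.filter (fun p => p.2 == "STOP_LOSS")).map Prod.fst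

def mcTList (s : PySem.Set String) (ps : List (String × String)) : List String :=
  (ps.filter (fun p => p.2 == "TAKE_PROFIT"
      && !(PySem.Set.contains (PySem.Set.update s (mcStops ps)) p.1))).map Prod.fst

-- A's loop over trades is A's loop over the qualifying pairs (none = the same KeyError)
theorem mcLoopA_eq_pairs (ts : List (List (String × String)))
    (s k : PySem.Set String) :
    mcLoopA (ts.map PySem.Dict.mk) s k = (mcPairs ts).map (fun ps => mcLoopP ps s k) := by
  induction ts generalizing s k with
  | nil => simp [mcLoopA, mcPairs, mcLoopP]
  | cons t ts ih =>
    simp only [List.map_cons, mcLoopA, mcPairs]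
    by_cases hsig : (((PySem.Dict.mk t).get? "signal" == some "ORB")
        || ((PySem.Dict.mk t).get? "signal" == some "GAP_GO")) = true
    · rw [if_neg (by simp [hsig])]
      rw [show "12:44".toList = ['1', '2', ':', '4', '4'] from rfl]
      by_cases htime : (PySem.Chars.strLt ['1', '2', ':', '4', '4'] (((PySem.Dict.mk t).getD "exit_time" "").toList)) = true
      · rw [if_pos htime, if_neg (by simp [htime]), ih]
      · rw [if_neg htime, if_pos (by simp [hsig, htime])]
        cases htk : (PySem.Dict.mk t).get? "ticker" with
        | none => simp
        | some tk =>
          simp only [Option.map_map]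
          split_ifs with h1 h2
          · rw [ih]; congr 1; funext ps
            simp only [Function.comp, mcLoopP]
            rw [if_pos h1]
          · rw [ih]; congr 1; funext ps
            simp only [Function.comp, mcLoopP]
            rw [if_neg h1, if_pos h2]
          · rw [ih]; congr 1; funext ps
            simp only [Function.comp, mcLoopP]
            rw [if_neg h1, if_neg h2]
    · have hf : (((PySem.Dict.mk t).get? "signal" == some "ORB")
          || ((PySem.Dict.mk t).get? "signal" == some "GAP_GO")) = false := by
        simpa using hsig
      rw [if_pos hf, if_neg (by simp [hf]), ih]

theorem filter_add_of_neg (k : PySem.Set String) (tk : String) (P : String → Bool)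
    (h : P tk = false) : (PySem.Set.add k tk).filter P = k.filter P := by
  unfold PySem.Set.add
  split_ifs with hmem
  · rfl
  · simp [List.filter_append, h]

theorem filter_add_of_pos (k : PySem.Set String) (tk : String) (P : String → Bool)
    (h : P tk = true) : (PySem.Set.add k tk).filter P = PySem.Set.add (k.filter P) tk := by
  unfold PySem.Set.add
  by_cases hmem : tk ∈ k
  · have h1 : PySem.Set.contains k tk = true := by simp [PySem.Set.contains, hmem]
    have h2 : PySem.Set.contains (k.filter P) tk = true := by
      simp [PySem.Set.contains, List.mem_filter, hmem, h]
    rw [if_pos h1, if_pos h2]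
  · have h1 : ¬ PySem.Set.contains k tk = true := by simp [PySem.Set.contains, hmem]
    have h2 : ¬ PySem.Set.contains (k.filter P) tk = true := by
      simp [PySem.Set.contains, List.mem_filter, hmem]
    rw [if_neg h1, if_neg h2, List.filter_append]
    simp [h]

-- the invariant of A's pair loop: final stop is s plus all stops; final take is the survivors of k
-- plus the takes whose ticker avoids the FINAL stop set
theorem mcLoopP_char (ps : List (String × String)) (s k : PySem.Set String) :
    mcLoopP ps s k =
      (PySem.Set.update s (mcStops ps),
       PySem.Set.update (k.filter (fun x => !((mcStops ps).contains x))) (mcTList s ps)) := by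
  induction ps generalizing s k with
  | nil => simp [mcLoopP, mcStops, mcTList, PySem.Set.update]
  | cons p ps ih =>
    obtain ⟨tk, r⟩ := p
    by_cases hr : (r == "STOP_LOSS") = true
    · -- STOP_LOSS step
      have hrr : r = "STOP_LOSS" := by simpa using hr
      subst hrr
      have hstops : mcStops ((tk, "STOP_LOSS") :: ps) = tk :: mcStops ps := by
        simp [mcStops]
      have htl : mcTList s ((tk, "STOP_LOSS") :: ps)
          = mcTList (PySem.Set.add s tk) ps := by
        simp [mcTList, hstops, PySem.Set.update]
      have hfil : k.filter (fun x => !((tk :: mcStops ps).contains x))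
          = (PySem.Set.discard k tk).filter (fun x => !((mcStops ps).contains x)) := by
        rw [PySem.Set.discard, List.filter_filter]
        apply List.filter_congr
        intro x _
        by_cases hx : x = tk <;> simp [hx]
      rw [show mcLoopP ((tk, "STOP_LOSS") :: ps) s k
            = mcLoopP ps (PySem.Set.add s tk) (PySem.Set.discard k tk) from by
          simp only [mcLoopP]; rw [if_pos hr]]
      rw [ih, hstops, htl, hfil]
      rfl
    · by_cases hr2 : (r == "TAKE_PROFIT" && !(PySem.Set.contains s tk)) = true
      · -- TAKE_PROFIT on a ticker not (yet) stopped at this point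
        have hrt : r = "TAKE_PROFIT" := by
          have := (Bool.and_eq_true _ _).mp hr2
          simpa using this.1
        have hsmem : tk ∉ s := by
          have := (Bool.and_eq_true _ _).mp hr2
          simpa [PySem.Set.contains, List.elem_iff] using this.2
        subst hrt
        have hstops : mcStops ((tk, "TAKE_PROFIT") :: ps) = mcStops ps := by
          simp [mcStops]
        rw [show mcLoopP ((tk, "TAKE_PROFIT") :: ps) s k
              = mcLoopP ps s (PySem.Set.add k tk) from by
            simp only [mcLoopP]; rw [if_neg hr, if_pos hr2]]
        rw [ih, hstops]
        by_cases hc : tk ∈ mcStops ps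
        · -- a later stop kills this take
          have htl : mcTList s ((tk, "TAKE_PROFIT") :: ps) = mcTList s ps := by
            simp [mcTList, hstops, hc]
          rw [htl, filter_add_of_neg _ _ _ (by simp [hc])]
        · -- no stop anywhere: the take survives
          have htl : mcTList s ((tk, "TAKE_PROFIT") :: ps) = tk :: mcTList s ps := by
            simp [mcTList, hstops, hc, hsmem]
          rw [htl, filter_add_of_pos _ _ _ (by simp [hc])]
          rfl
      · -- any other exit reason (or a take already stopped before): no change
        have hstops : mcStops ((tk, r) :: ps) = mcStops ps := by
          simp [mcStops, hr]
        have htl : mcTList s ((tk, r) :: ps) = mcTList s ps := by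
          by_cases hrt : (r == "TAKE_PROFIT") = true
          · have hrtr : r = "TAKE_PROFIT" := by simpa using hrt
            subst hrtr
            have hsmem : tk ∈ s := by
              by_contra hn
              exact hr2 (by simp [PySem.Set.contains, hn])
            simp [mcTList, hstops, hsmem]
          · have hrtf : ¬ r = "TAKE_PROFIT" := by simpa using hrt
            simp [mcTList, hstops, hrtf]
        rw [show mcLoopP ((tk, r) :: ps) s k = mcLoopP ps s k from by
            simp only [mcLoopP]; rw [if_neg hr, if_neg hr2]]
        rw [ih, hstops, htl]

-- ===== VERDICT (by name: the statement is the Claim_ definition above) =====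
theorem morning_context_spec : Claim_equal_morning_context := by
  intro day _ _
  unfold Spec_morning_context morning_context morning_context_alt
  cases hg : PySem.Dict.get? (PySem.Dict.mk day) "trades" with
  | none => rfl
  | some trades =>
    dsimp only
    rw [mcLoopA_eq_pairs]
    cases hp : mcPairs trades with
    | none => rfl
    | some ps =>
      dsimp only
      simp only [Option.map_some, Option.getD_some]
      rw [mcLoopP_char]
      rfl
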